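-- pv_equiv track=rewrite | github.com/dig-team/Qiana | src/qiana/qianaExtension/tptpParsing.py | _findBalancedBinaryOperator
-- ===== SOURCE A (Python) =====
-- from typing import List, Dict, Tuple
--
-- def _findBalancedBinaryOperator(tptp: str) -> Tuple[str, str, str] | None:
--     """
--     Find a binary operator (=>, <=>, =, &, |) that is at the top level (not inside parentheses).
--     Returns (left_part, operator, right_part) if found, None otherwise.
--     """
--     operators = ["<=>", "=>", "=", "&", "|"]  # Order matters: check longer operators first
--
--     parenthesis_depth = 0
--     for i, char in enumerate(tptp):
--         if char == "(":
--             parenthesis_depth += 1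
--         elif char == ")":
--             parenthesis_depth -= 1
--         elif parenthesis_depth == 0:
--             # Check all operators at this position
--             for op in operators:
--                 if (i + len(op) <= len(tptp) and tptp[i:i+len(op)] == op):
--                     # Check if it's not part of a larger alphanumeric token
--                     left_ok = i == 0 or not tptp[i-1].isalnum()
--                     right_ok = i+len(op) == len(tptp) or not tptp[i+len(op)].isalnum()
--                     if left_ok and right_ok:
--                         left_part = tptp[:i].strip()
--                         right_part = tptp[i+len(op):].strip()
--                         return (left_part, op, right_part)
--
--     return None
-- ===== SOURCE B (Python) =====
-- def _findBalancedBinaryOperator(tptp):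
--     """
--     Two-phase rewrite: (1) one pass computes the paren depth before every character;
--     (2) for each operator, find its earliest top-level, boundary-valid index;
--     pick the candidate with the smallest index, ties broken by operator priority.
--     """
--     operators = ["<=>", "=>", "=", "&", "|"]
--     n = len(tptp)
--     depths = []
--     d = 0
--     for ch in tptp:
--         depths.append(d)
--         d += (ch == "(") - (ch == ")")
--     best = None  # (index, rank)
--     for rank, op in enumerate(operators):
--         for i in range(n):
--             if (depths[i] == 0 and tptp[i] != "(" and tptp[i] != ")"
--                     and tptp.startswith(op, i)
--                     and (i == 0 or not tptp[i-1].isalnum())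
--                     and (i + len(op) == n or not tptp[i+len(op)].isalnum())):
--                 if best is None or (i, rank) < best:
--                     best = (i, rank)
--                 break
--     if best is None:
--         return None
--     i, rank = best
--     op = operators[rank]
--     return (tptp[:i].strip(), op, tptp[i+len(op):].strip())
-- ===== Notes on version B (the rewrite author's own statement) =====
-- stated objective: alternative
-- what changed: A's single left-to-right scan that tracks parenthesis depth and early-returns at the first matching position is replaced by a two-phase decomposition: one pass builds a per-character depth array, then each operator independently finds its earliest top-level boundary-valid index via the array, and the winner is the lexicographic minimum of (index, operator priority).
import Mathlib
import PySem

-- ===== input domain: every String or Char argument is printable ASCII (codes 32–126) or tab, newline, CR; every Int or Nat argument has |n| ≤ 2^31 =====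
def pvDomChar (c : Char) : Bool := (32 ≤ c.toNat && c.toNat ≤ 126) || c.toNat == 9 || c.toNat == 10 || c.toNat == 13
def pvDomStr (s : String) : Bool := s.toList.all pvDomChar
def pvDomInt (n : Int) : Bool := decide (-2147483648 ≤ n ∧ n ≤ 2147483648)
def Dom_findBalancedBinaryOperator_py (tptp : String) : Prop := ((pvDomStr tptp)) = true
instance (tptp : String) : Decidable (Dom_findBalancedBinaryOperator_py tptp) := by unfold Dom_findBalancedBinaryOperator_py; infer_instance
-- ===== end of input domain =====

-- B replaces A's single depth-tracking scan with a two-phase pass (depth array, then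
-- per-operator earliest top-level match, lexicographic-minimum candidate); same cost class.


-- ===== PORT A =====
-- operators = ["<=>", "=>", "=", "&", "|"]  (kept as char lists; outputs are rebuilt with String.ofList)
def pvOps : List (List Char) := [['<','=','>'], ['=','>'], ['='], ['&'], ['|']]

-- inner 'for op in operators' loop of A at position i (early return on the first hit)
def pvAInner (cs : List Char) (i : Nat) : List (List Char) → Option (String × String × String)
  | [] => none
  | op :: rest =>
    -- if i + len(op) <= len(tptp) and tptp[i:i+len(op)] == op
    if decide (i + op.length ≤ cs.length) &&
       (PySem.List.slice cs (some (i : Int)) (some ((i : Int) + (op.length : Int))) == op) then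
      -- left_ok / right_ok; tptp[i-1] and tptp[i+len(op)] are in range when inspected
      let left_ok := (i == 0) || !(PySem.Chars.isalnum (cs.getD (i - 1) ' '))
      let right_ok := (i + op.length == cs.length) || !(PySem.Chars.isalnum (cs.getD (i + op.length) ' '))
      if left_ok && right_ok then
        some (String.ofList (PySem.Chars.strip (cs.take i)), String.ofList op,
              String.ofList (PySem.Chars.strip (cs.drop (i + op.length))))
      else pvAInner cs i rest
    else pvAInner cs i rest

-- outer 'for i, char in enumerate(tptp)' loop of A, carrying parenthesis_depth
def pvALoop (cs : List Char) : Nat → Int → List Char → Option (String × String × String)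
  | _, _, [] => none
  | i, depth, c :: rest =>
    if c = '(' then pvALoop cs (i + 1) (depth + 1) rest
    else if c = ')' then pvALoop cs (i + 1) (depth - 1) rest
    else if depth = 0 then
      match pvAInner cs i pvOps with
      | some r => some r
      | none => pvALoop cs (i + 1) depth rest
    else pvALoop cs (i + 1) depth rest

def findBalancedBinaryOperator_py (tptp : String) : Option (String × String × String) :=
  pvALoop tptp.toList 0 0 tptp.toList

-- ===== PORT B =====
-- phase 1: depths[i] = paren depth before character i
def pvBDepthStep (acc : List Int × Int) (ch : Char) : List Int × Int :=
  (acc.1 ++ [acc.2], acc.2 + ((if ch = '(' then (1 : Int) else 0) - (if ch = ')' then (1 : Int) else 0)))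

def pvBDepths (cs : List Char) : List Int := (cs.foldl pvBDepthStep ([], 0)).1

-- the candidate test of Source B's inner if
def pvBCond (cs : List Char) (depths : List Int) (op : List Char) (i : Nat) : Bool :=
  (depths.getD i 0 == 0) && !(cs.getD i ' ' == '(') && !(cs.getD i ' ' == ')') &&
  PySem.Chars.startswith (cs.drop i) op &&   -- tptp.startswith(op, i)
  ((i == 0) || !(PySem.Chars.isalnum (cs.getD (i - 1) ' '))) &&
  ((i + op.length == cs.length) || !(PySem.Chars.isalnum (cs.getD (i + op.length) ' ')))

-- 'for rank, op in enumerate(operators)': earliest match per op ('break'), lex-min update of best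
def pvBFold (cs : List Char) (depths : List Int) : Nat → List (List Char) → Option (Nat × Nat) → Option (Nat × Nat)
  | _, [], best => best
  | rank, op :: rest, best =>
    let best' :=
      match (List.range cs.length).find? (pvBCond cs depths op) with
      | none => best
      | some i =>
        match best with
        | none => some (i, rank)
        | some b => if i < b.1 ∨ (i = b.1 ∧ rank < b.2) then some (i, rank) else some b
    pvBFold cs depths (rank + 1) rest best'

def findBalancedBinaryOperator_py_alt (tptp : String) : Option (String × String × String) :=
  let cs := tptp.toList
  let depths := pvBDepths cs
  match pvBFold cs depths 0 pvOps none with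
  | none => none
  | some (i, rank) =>
    let op := pvOps.getD rank []
    some (String.ofList (PySem.Chars.strip (cs.take i)), String.ofList op,
          String.ofList (PySem.Chars.strip (cs.drop (i + op.length))))

-- ===== PRECONDITION & SPEC =====
def Spec_findBalancedBinaryOperator_py (tptp : String) (out : Option (String × String × String)) : Prop := out = findBalancedBinaryOperator_py_alt tptp
instance (tptp : String) (out : Option (String × String × String)) : Decidable (Spec_findBalancedBinaryOperator_py tptp out) := by unfold Spec_findBalancedBinaryOperator_py; infer_instance

-- ===== CLAIM (what is proved, stated in full; the proofs are below) =====
def Claim_equal_findBalancedBinaryOperator_py : Prop := ∀ (tptp : String), Dom_findBalancedBinaryOperator_py tptp → Spec_findBalancedBinaryOperator_py tptp (findBalancedBinaryOperator_py tptp)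

-- ===== LEMMAS AND PROOFS =====

-- paren depth before position i (the value A's loop carries and B's depth array stores)
def pvDepth (cs : List Char) (i : Nat) : Int :=
  ((cs.take i).count '(' : Int) - ((cs.take i).count ')' : Int)

-- the common candidate predicate: operator of rank r matches at i at top level with valid boundaries
def pvCand (cs : List Char) (i r : Nat) : Bool :=
  let op := pvOps.getD r []
  decide (i < cs.length) && decide (pvDepth cs i = 0) && decide (op <+: cs.drop i) &&
  ((i == 0) || !(PySem.Chars.isalnum (cs.getD (i - 1) ' '))) &&
  ((i + op.length == cs.length) || !(PySem.Chars.isalnum (cs.getD (i + op.length) ' ')))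

-- lexicographic order on (index, rank)
def pvLex (p q : Nat × Nat) : Prop := p.1 < q.1 ∨ (p.1 = q.1 ∧ p.2 ≤ q.2)

-- what "the best candidate" means
def pvIsBest (cs : List Char) : Option (Nat × Nat) → Prop
  | none => ∀ i r, r < 5 → pvCand cs i r = false
  | some p => p.2 < 5 ∧ pvCand cs p.1 p.2 = true ∧ ∀ i r, r < 5 → pvCand cs i r = true → pvLex p (i, r)

-- shared output construction
def pvOut (cs : List Char) (p : Nat × Nat) : String × String × String :=
  let op := pvOps.getD p.2 []
  (String.ofList (PySem.Chars.strip (cs.take p.1)), String.ofList op,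
   String.ofList (PySem.Chars.strip (cs.drop (p.1 + op.length))))

theorem pvIsBest_unique (cs : List Char) (o₁ o₂ : Option (Nat × Nat))
    (h₁ : pvIsBest cs o₁) (h₂ : pvIsBest cs o₂) : o₁ = o₂ := by
  cases o₁ with
  | none =>
    cases o₂ with
    | none => rfl
    | some q =>
      simp only [pvIsBest] at h₁ h₂
      have := h₁ q.1 q.2 h₂.1
      rw [h₂.2.1] at this
      cases this
  | some p =>
    cases o₂ with
    | none =>
      simp only [pvIsBest] at h₁ h₂
      have := h₂ p.1 p.2 h₁.1
      rw [h₁.2.1] at this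
      cases this
    | some q =>
      simp only [pvIsBest] at h₁ h₂
      have h12 := h₁.2.2 q.1 q.2 h₂.1 h₂.2.1
      have h21 := h₂.2.2 p.1 p.2 h₁.1 h₁.2.1
      unfold pvLex at h12 h21
      have hh : p.1 = q.1 ∧ p.2 = q.2 := by omega
      have : p = q := Prod.ext hh.1 hh.2
      rw [this]

-- generic find?-over-a-range facts (first hit, minimality)
theorem pvFind?_congr {p q : Nat → Bool} (l : List Nat) (h : ∀ a ∈ l, p a = q a) :
    l.find? p = l.find? q := by
  induction l with
  | nil => rfl
  | cons x t ih =>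
    simp only [List.find?_cons, h x (by simp)]
    cases hq : q x with
    | true => rfl
    | false => exact ih (fun a ha => h a (by simp [ha]))

theorem pvFind?_range' (f : Nat → Bool) : ∀ (k s : Nat),
    ((List.range' s k).find? f = none → ∀ j, s ≤ j → j < s + k → f j = false) ∧
    (∀ i, (List.range' s k).find? f = some i →
      s ≤ i ∧ i < s + k ∧ f i = true ∧ ∀ j, s ≤ j → j < i → f j = false) := by
  intro k
  induction k with
  | zero => intro s; refine ⟨fun _ j hj hj' => by omega, fun i hi => by simp at hi⟩
  | succ k ih =>
    intro s
    have hr : List.range' s (k+1) = s :: List.range' (s+1) k := by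
      simp [List.range'_succ]
    constructor
    · intro hn j hj hj'
      rw [hr, List.find?_cons] at hn
      cases hfs : f s with
      | true => simp [hfs] at hn
      | false =>
        simp only [hfs, cond_false] at hn
        rcases Nat.eq_or_lt_of_le hj with h | h
        · rw [← h]; exact hfs
        · exact (ih (s+1)).1 hn j h (by omega)
    · intro i hi
      rw [hr, List.find?_cons] at hi
      cases hfs : f s with
      | true =>
        simp only [hfs, cond_true, Option.some.injEq] at hi
        subst hi
        exact ⟨le_refl _, by omega, hfs, fun j hj hj' => by omega⟩
      | false =>
        simp only [hfs, cond_false] at hi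
        obtain ⟨h1, h2, h3, h4⟩ := (ih (s+1)).2 i hi
        refine ⟨by omega, by omega, h3, fun j hj hj' => ?_⟩
        rcases Nat.eq_or_lt_of_le hj with h | h
        · rw [← h]; exact hfs
        · exact h4 j h hj'

-- a candidate needs its index in range
theorem pvCand_lt (cs : List Char) (i r : Nat) (h : pvCand cs i r = true) : i < cs.length := by
  unfold pvCand at h
  simp only [Bool.and_eq_true, decide_eq_true_eq] at h
  exact h.1.1.1.1

-- a candidate's position carries the operator's first character (never a parenthesis)
theorem pvCand_not_paren (cs : List Char) (i r : Nat) (hr : r < 5) (hp : pvCand cs i r = true) :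
    ∃ (h : i < cs.length), cs[i] ≠ '(' ∧ cs[i] ≠ ')' := by
  have hlt := pvCand_lt cs i r hp
  refine ⟨hlt, ?_⟩
  unfold pvCand at hp
  simp only [Bool.and_eq_true, decide_eq_true_eq] at hp
  have hpre := hp.1.1.2
  have hhead : ∀ (c : Char) (t : List Char), pvOps.getD r [] = c :: t → cs[i] = c := by
    intro c t hct
    rw [hct] at hpre
    obtain ⟨u, hu⟩ := hpre
    have : (cs.drop i).head? = some c := by rw [← hu]; rfl
    rw [List.head?_drop, List.getElem?_eq_getElem hlt] at this
    exact Option.some.inj this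
  interval_cases r <;>
    first
    | (have := hhead '<' ['=','>'] rfl; rw [this]; decide)
    | (have := hhead '=' ['>'] rfl; rw [this]; decide)
    | (have := hhead '=' [] rfl; rw [this]; decide)
    | (have := hhead '&' [] rfl; rw [this]; decide)
    | (have := hhead '|' [] rfl; rw [this]; decide)

-- depth evolves by the character read
theorem pvDepth_succ (cs : List Char) (i : Nat) (h : i < cs.length) :
    pvDepth cs (i+1) = pvDepth cs i +
      ((if cs[i] = '(' then (1 : Int) else 0) - (if cs[i] = ')' then (1 : Int) else 0)) := by
  unfold pvDepth
  rw [List.take_succ_eq_append_getElem h]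
  by_cases h1 : cs[i] = '(' <;> by_cases h2 : cs[i] = ')' <;>
    simp only [List.count_append, List.count_singleton, h1, h2, if_true, if_false]
  · rw [h1] at h2; exact absurd h2 (by decide)
  · simp; ring
  · simp; ring
  · simp [h1, h2]

-- depth must be zero for a candidate
theorem pvCand_depth (cs : List Char) (i r : Nat) (h : pvDepth cs i ≠ 0) : pvCand cs i r = false := by
  unfold pvCand
  simp only [Bool.and_eq_true, Bool.and_assoc]
  cases hd : decide (pvDepth cs i = 0) with
  | false => simp
  | true => simp at hd; exact absurd hd h

theorem pvCand_ge (cs : List Char) (i r : Nat) (h : ¬ i < cs.length) : pvCand cs i r = false := by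
  unfold pvCand
  cases hd : decide (i < cs.length) with
  | false => simp
  | true => simp at hd; exact absurd hd h

-- A's guard ("i+len(op) <= len and slice == op") is exactly "op is a prefix of cs.drop i"
theorem pvMatch_iff (cs op : List Char) (i : Nat) (hile : i ≤ cs.length) :
    ((decide (i + op.length ≤ cs.length) &&
      (PySem.List.slice cs (some (i : Int)) (some ((i : Int) + (op.length : Int))) == op)) = true)
    ↔ op <+: cs.drop i := by
  rw [PySem.List.slice_natCast_add]
  constructor
  · intro h'
    simp only [Bool.and_eq_true, beq_iff_eq] at h'
    exact List.prefix_iff_eq_take.mpr h'.2.symm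
  · intro hp
    have hlen : op.length ≤ (cs.drop i).length := hp.length_le
    simp only [List.length_drop] at hlen
    simp only [Bool.and_eq_true, beq_iff_eq, decide_eq_true_eq]
    exact ⟨by omega, (List.prefix_iff_eq_take.mp hp).symm⟩

-- the first rank matching at position i
def pvRank? (cs : List Char) (i : Nat) : Option Nat :=
  (List.range' 0 5).find? (fun r => pvCand cs i r)

-- A's inner operator loop finds the first matching rank
theorem pvAInner_eq (cs : List Char) (i : Nat) (hi : i < cs.length) (hd : pvDepth cs i = 0) :
    ∀ (ops' : List (List Char)) (k : Nat), k + ops'.length = 5 → ops' = pvOps.drop k →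
    pvAInner cs i ops' =
      ((List.range' k (5 - k)).find? (fun r => pvCand cs i r)).map (fun r => pvOut cs (i, r)) := by
  intro ops'
  induction ops' with
  | nil =>
    intro k hk _
    simp only [List.length_nil] at hk
    have h0 : 5 - k = 0 := by omega
    simp [pvAInner, h0]
  | cons op rest ih =>
    intro k hk hdrop
    simp only [List.length_cons] at hk
    have hk5 : k < 5 := by omega
    have hop : pvOps.getD k [] = op := by
      have h1 : pvOps[k]? = some op := by
        rw [← List.head?_drop, ← hdrop]; rfl
      simp [List.getD_eq_getElem?_getD, h1]
    have hrest : rest = pvOps.drop (k + 1) := by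
      rw [← List.tail_drop, ← hdrop]
      rfl
    have hrange : List.range' k (5 - k) = k :: List.range' (k + 1) (5 - (k + 1)) := by
      have h5 : 5 - k = (5 - (k + 1)) + 1 := by omega
      rw [h5, List.range'_succ]
    have hkk : k + 1 + rest.length = 5 := by omega
    rw [hrange, List.find?_cons]
    simp only [pvAInner]
    by_cases hm : op <+: cs.drop i
    · have hmb := (pvMatch_iff cs op i hi.le).mpr hm
      rw [hmb]
      simp only [if_true]
      have hcand : pvCand cs i k =
          (((i == 0) || !(PySem.Chars.isalnum (cs.getD (i - 1) ' '))) &&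
           ((i + op.length == cs.length) || !(PySem.Chars.isalnum (cs.getD (i + op.length) ' ')))) := by
        simp only [pvCand]
        rw [hop]
        simp only [hi, hd, hm, decide_true, Bool.true_and, Bool.and_assoc]
      by_cases hb : (((i == 0) || !(PySem.Chars.isalnum (cs.getD (i - 1) ' '))) &&
           ((i + op.length == cs.length) || !(PySem.Chars.isalnum (cs.getD (i + op.length) ' ')))) = true
      · rw [hb] at hcand
        simp only [hb, if_true, hcand, cond_true, Option.map_some]
        simp only [pvOut]
        rw [hop]
      · have hbf := Bool.eq_false_iff.mpr hb
        rw [hbf] at hcand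
        simp only [hbf, if_false, hcand, cond_false]
        exact ih (k + 1) hkk hrest
    · have hmf : (decide (i + op.length ≤ cs.length) &&
          (PySem.List.slice cs (some (i : Int)) (some ((i : Int) + (op.length : Int))) == op)) = false := by
        rw [Bool.eq_false_iff]
        intro hc
        exact hm ((pvMatch_iff cs op i hi.le).mp hc)
      have hcf : pvCand cs i k = false := by
        simp only [pvCand]
        rw [hop]
        simp [hm]
      rw [hmf]
      simp only [if_false, hcf, cond_false]
      exact ih (k + 1) hkk hrest

-- A's outer loop: first position with a matching rank, then its first rank
theorem pvALoop_eq (cs : List Char) :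
    ∀ (rest : List Char) (i : Nat), rest = cs.drop i → i ≤ cs.length →
    pvALoop cs i (pvDepth cs i) rest =
      (((List.range' i (cs.length - i)).find? (fun j => (pvRank? cs j).isSome)).bind
        (fun j => (pvRank? cs j).map (fun r => pvOut cs (j, r)))) := by
  intro rest
  induction rest with
  | nil =>
    intro i hdrop hle
    have h0 : cs.length - i = 0 := by
      have := List.drop_eq_nil_iff.mp hdrop.symm
      omega
    simp [pvALoop, h0]
  | cons c rest' ih =>
    intro i hdrop hle
    have hlt : i < cs.length := by
      by_contra hge
      push_neg at hge
      have : cs.drop i = [] := List.drop_eq_nil_of_le hge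
      rw [this] at hdrop
      cases hdrop
    have hci : cs[i] = c := by
      have : (cs.drop i).head? = some c := by rw [← hdrop]; rfl
      rw [List.head?_drop, List.getElem?_eq_getElem hlt] at this
      exact Option.some.inj this
    have hrest' : rest' = cs.drop (i + 1) := by
      rw [← List.tail_drop, ← hdrop]
      rfl
    have hrange : List.range' i (cs.length - i) = i :: List.range' (i + 1) (cs.length - (i + 1)) := by
      have h5 : cs.length - i = (cs.length - (i + 1)) + 1 := by omega
      rw [h5, List.range'_succ]
    rw [hrange, List.find?_cons]
    simp only [pvALoop]
    by_cases hc1 : c = '('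
    · have hnone : pvRank? cs i = none := by
        apply List.find?_eq_none.mpr
        intro r hr
        simp only [Bool.not_eq_true]
        by_contra hcand
        simp only [Bool.not_eq_false] at hcand
        obtain ⟨_, hp1, hp2⟩ := pvCand_not_paren cs i r (by simpa [List.mem_range'_1] using hr) hcand
        rw [hci, hc1] at hp1
        exact hp1 rfl
      have hdsucc : pvDepth cs (i + 1) = pvDepth cs i + 1 := by
        rw [pvDepth_succ cs i hlt, hci, hc1]
        simp
      rw [if_pos hc1, ← hdsucc, ih (i + 1) hrest' (by omega)]
      simp [hnone]
    · by_cases hc2 : c = ')'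
      · have hnone : pvRank? cs i = none := by
          apply List.find?_eq_none.mpr
          intro r hr
          simp only [Bool.not_eq_true]
          by_contra hcand
          simp only [Bool.not_eq_false] at hcand
          obtain ⟨_, hp1, hp2⟩ := pvCand_not_paren cs i r (by simpa [List.mem_range'_1] using hr) hcand
          rw [hci, hc2] at hp2
          exact hp2 rfl
        have hdsucc : pvDepth cs (i + 1) = pvDepth cs i - 1 := by
          rw [pvDepth_succ cs i hlt, hci]
          simp [hc1, hc2]
          ring
        rw [if_neg hc1, if_pos hc2, ← hdsucc, ih (i + 1) hrest' (by omega)]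
        simp [hnone]
      · have hdsucc : pvDepth cs (i + 1) = pvDepth cs i := by
          rw [pvDepth_succ cs i hlt, hci]
          simp [hc1, hc2]
        by_cases hd : pvDepth cs i = 0
        · rw [if_neg hc1, if_neg hc2, if_pos hd]
          have hinner := pvAInner_eq cs i hlt hd pvOps 0 rfl rfl
          simp only [Nat.sub_zero] at hinner
          rw [hinner]
          cases hrk : pvRank? cs i with
          | some r =>
            unfold pvRank? at hrk
            simp [hrk, pvRank?]
          | none =>
            unfold pvRank? at hrk
            simp [pvRank?, hrk]
            rw [← hdsucc, ih (i + 1) hrest' (by omega)]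
            simp [pvRank?]
        · have hnone : pvRank? cs i = none := by
            apply List.find?_eq_none.mpr
            intro r hr
            simp [pvCand_depth cs i r hd]
          rw [if_neg hc1, if_neg hc2, if_neg hd, ← hdsucc, ih (i + 1) hrest' (by omega)]
          simp [hnone]


-- index minimality packaged for reuse
theorem pvFirst_min (cs : List Char) (rk i0 : Nat)
    (hF : (List.range' 0 cs.length).find? (fun i => pvCand cs i rk) = some i0) :
    pvCand cs i0 rk = true ∧ ∀ i, pvCand cs i rk = true → i0 ≤ i := by
  obtain ⟨_, _, hc0, hmin⟩ := (pvFind?_range' (fun i => pvCand cs i rk) cs.length 0).2 i0 hF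
  refine ⟨hc0, fun i hc => ?_⟩
  by_contra hlt
  push_neg at hlt
  have := hmin i (by omega) hlt
  rw [hc] at this
  cases this

theorem pvRank?_none (cs : List Char) (i : Nat) (h : pvRank? cs i = none) :
    ∀ r, r < 5 → pvCand cs i r = false := by
  intro r hr
  have := List.find?_eq_none.mp h r (by simp [List.mem_range'_1]; omega)
  simpa using this

theorem pvA_isBest (tptp : String) :
    ∃ o, pvIsBest tptp.toList o ∧ findBalancedBinaryOperator_py tptp = o.map (pvOut tptp.toList) := by
  set cs := tptp.toList with hcs
  have hrun : findBalancedBinaryOperator_py tptp =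
      (((List.range' 0 cs.length).find? (fun j => (pvRank? cs j).isSome)).bind
        (fun j => (pvRank? cs j).map (fun r => pvOut cs (j, r)))) := by
    have h0 : pvDepth cs 0 = 0 := by simp [pvDepth]
    have := pvALoop_eq cs cs 0 (by rfl) (by omega)
    rw [h0] at this
    simpa [findBalancedBinaryOperator_py] using this
  refine ⟨(((List.range' 0 cs.length).find? (fun j => (pvRank? cs j).isSome)).bind
    (fun j => (pvRank? cs j).map (fun r => (j, r)))), ?_, ?_⟩
  · cases hJ : (List.range' 0 cs.length).find? (fun j => (pvRank? cs j).isSome) with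
    | none =>
      intro i r hr
      by_cases hi : i < cs.length
      · have hS := (pvFind?_range' (fun j => (pvRank? cs j).isSome) cs.length 0).1 hJ i (by omega) (by omega)
        have hrnone : pvRank? cs i = none := by
          cases h' : pvRank? cs i with
          | none => rfl
          | some _ => rw [h'] at hS; cases hS
        exact pvRank?_none cs i hrnone r hr
      · exact pvCand_ge cs i r hi
    | some j =>
      obtain ⟨_, hjlt, hjs, hjmin⟩ := (pvFind?_range' (fun j => (pvRank? cs j).isSome) cs.length 0).2 j hJ
      cases hR : pvRank? cs j with
      | none => rw [hR] at hjs; cases hjs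
      | some r =>
        obtain ⟨_, hr5, hcr, hrmin⟩ := (pvFind?_range' (fun r => pvCand cs j r) 5 0).2 r hR
        have hred : ((some j).bind (fun j => (pvRank? cs j).map (fun r => (j, r)))) = some (j, r) := by
          simp [hR]
        rw [hred]
        refine ⟨by omega, hcr, ?_⟩
        intro i r' h5 hcand
        rcases lt_trichotomy i j with h | h | h
        · have hS := hjmin i (by omega) h
          have hrnone : pvRank? cs i = none := by
            cases h' : pvRank? cs i with
            | none => rfl
            | some _ => rw [h'] at hS; cases hS
          rw [pvRank?_none cs i hrnone r' h5] at hcand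
          cases hcand
        · subst h
          right
          refine ⟨rfl, ?_⟩
          by_contra hlt
          push_neg at hlt
          have := hrmin r' (by omega) hlt
          rw [hcand] at this
          cases this
        · left; exact h
  · rw [hrun]
    cases hJ : (List.range' 0 cs.length).find? (fun j => (pvRank? cs j).isSome) with
    | none => simp
    | some j =>
      cases hR : pvRank? cs j with
      | none => simp [hR]
      | some r => simp [hR]

-- ===== B-side lemmas =====
theorem pvDepth_cons_succ (c : Char) (cs : List Char) (i : Nat) :
    pvDepth (c :: cs) (i + 1) =
      ((if c = '(' then (1 : Int) else 0) - (if c = ')' then (1 : Int) else 0)) + pvDepth cs i := by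
  unfold pvDepth
  rw [List.take_succ_cons]
  by_cases h1 : c = '(' <;> by_cases h2 : c = ')' <;>
    simp only [List.count_cons, h1, h2, if_true, if_false]
  · rw [h1] at h2; exact absurd h2 (by decide)
  · simp; push_cast; ring
  · simp; push_cast; ring
  · simp [h1, h2]

theorem pvBDepths_foldl (cs : List Char) : ∀ (acc : List Int) (d : Int),
    (cs.foldl pvBDepthStep (acc, d)).1 = acc ++ (List.range cs.length).map (fun i => d + pvDepth cs i) := by
  induction cs with
  | nil => intro acc d; simp
  | cons c cs' ih =>
    intro acc d
    simp only [List.foldl_cons, pvBDepthStep]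
    rw [ih]
    rw [List.length_cons, List.range_succ_eq_map]
    simp only [List.map_cons, List.map_map]
    rw [List.append_assoc, List.singleton_append]
    have h0 : pvDepth (c :: cs') 0 = 0 := by simp [pvDepth]
    rw [h0, add_zero]
    congr 1
    congr 1
    apply List.map_congr_left
    intro i _
    simp only [Function.comp_apply, Nat.succ_eq_add_one, pvDepth_cons_succ]
    ring

theorem pvBDepths_getD (cs : List Char) (i : Nat) (h : i < cs.length) :
    (pvBDepths cs).getD i 0 = pvDepth cs i := by
  unfold pvBDepths
  rw [pvBDepths_foldl cs [] 0]
  simp [List.getD_eq_getElem?_getD, List.getElem?_map, List.getElem?_range, h]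

theorem pvBCond_eq (cs : List Char) (r i : Nat) (hr : r < 5) (hi : i < cs.length) :
    pvBCond cs (pvBDepths cs) (pvOps.getD r []) i = pvCand cs i r := by
  have hget : cs.getD i ' ' = cs[i] := List.getD_eq_getElem cs ' ' hi
  rcases Bool.eq_false_or_eq_true (pvCand cs i r) with hc | hc
  · rw [hc]
    obtain ⟨hlt, hnp1, hnp2⟩ := pvCand_not_paren cs i r hr hc
    unfold pvCand at hc
    simp only [Bool.and_eq_true] at hc
    obtain ⟨⟨⟨⟨_, hB⟩, hC⟩, hE⟩, hF⟩ := hc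
    unfold pvBCond
    simp only [Bool.and_eq_true]
    refine ⟨⟨⟨⟨⟨?_, ?_⟩, ?_⟩, ?_⟩, hE⟩, hF⟩
    · rw [pvBDepths_getD cs i hi]
      simpa using hB
    · rw [hget]
      simp [hnp1]
    · rw [hget]
      simp [hnp2]
    · simpa [← PySem.Chars.startswith_iff] using hC

  · rw [hc, Bool.eq_false_iff]
    intro hb
    unfold pvBCond at hb
    simp only [Bool.and_eq_true] at hb
    obtain ⟨⟨⟨⟨⟨hA, _⟩, _⟩, hD⟩, hE⟩, hF⟩ := hb
    have hct : pvCand cs i r = true := by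
      unfold pvCand
      simp only [Bool.and_eq_true]
      refine ⟨⟨⟨⟨by simp [hi], ?_⟩, ?_⟩, hE⟩, hF⟩
      · rw [pvBDepths_getD cs i hi] at hA
        simpa using hA
      · simpa [← PySem.Chars.startswith_iff] using hD
    rw [hct] at hc
    cases hc
-- invariant carried by B's operator fold
def pvInv (cs : List Char) (rank : Nat) : Option (Nat × Nat) → Prop
  | none => ∀ i r, r < rank → pvCand cs i r = false
  | some p => p.2 < rank ∧ pvCand cs p.1 p.2 = true ∧ ∀ i r, r < rank → pvCand cs i r = true → pvLex p (i, r)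

theorem pvBFold_isBest (cs : List Char) :
    ∀ (ops' : List (List Char)) (rank : Nat) (best : Option (Nat × Nat)),
    rank + ops'.length = 5 → ops' = pvOps.drop rank → pvInv cs rank best →
    pvIsBest cs (pvBFold cs (pvBDepths cs) rank ops' best) := by
  intro ops'
  induction ops' with
  | nil =>
    intro rank best hk _ hinv
    simp only [List.length_nil] at hk
    have h5 : rank = 5 := by omega
    subst h5
    cases best with
    | none => exact hinv
    | some p => exact hinv
  | cons op rest ih =>
    intro rank best hk hdrop hinv
    simp only [List.length_cons] at hk
    have hr5 : rank < 5 := by omega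
    have hop : pvOps.getD rank [] = op := by
      have h1 : pvOps[rank]? = some op := by
        rw [← List.head?_drop, ← hdrop]; rfl
      simp [List.getD_eq_getElem?_getD, h1]
    have hrest : rest = pvOps.drop (rank + 1) := by
      rw [← List.tail_drop, ← hdrop]
      rfl
    have hfind : (List.range cs.length).find? (pvBCond cs (pvBDepths cs) op) =
        (List.range' 0 cs.length).find? (fun i => pvCand cs i rank) := by
      rw [List.range_eq_range']
      apply pvFind?_congr
      intro a ha
      have halt : a < cs.length := by
        simp only [List.mem_range'_1] at ha
        omega
      rw [← hop]
      exact pvBCond_eq cs rank a hr5 halt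
    simp only [pvBFold, hfind]
    cases hF : (List.range' 0 cs.length).find? (fun i => pvCand cs i rank) with
    | none =>
      have hnone : ∀ i, pvCand cs i rank = false := by
        intro i
        by_cases hi : i < cs.length
        · exact (pvFind?_range' (fun i => pvCand cs i rank) cs.length 0).1 hF i (by omega) (by omega)
        · exact pvCand_ge cs i rank hi
      apply ih (rank + 1) best (by omega) hrest
      cases best with
      | none =>
        intro i r hr
        rcases Nat.lt_or_ge r rank with h | h
        · exact hinv i r h
        · have : r = rank := by omega
          rw [this]
          exact hnone i
      | some p =>
        obtain ⟨hb2, hbc, hbmin⟩ := hinv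
        refine ⟨by omega, hbc, ?_⟩
        intro i r hr hcand
        rcases Nat.lt_or_ge r rank with h | h
        · exact hbmin i r h hcand
        · have : r = rank := by omega
          rw [this, hnone i] at hcand
          cases hcand
    | some i0 =>
      obtain ⟨hc0, hmin0⟩ := pvFirst_min cs rank i0 hF
      cases best with
      | none =>
        apply ih (rank + 1) (some (i0, rank)) (by omega) hrest
        refine ⟨by omega, hc0, ?_⟩
        intro i r hr hcand
        rcases Nat.lt_or_ge r rank with h | h
        · rw [hinv i r h] at hcand; cases hcand
        · have hrr : r = rank := by omega
          subst hrr
          have := hmin0 i hcand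
          unfold pvLex
          omega
      | some b =>
        obtain ⟨hb2, hbc, hbmin⟩ := hinv
        change pvIsBest cs (pvBFold cs (pvBDepths cs) (rank + 1) rest
          (if i0 < b.1 ∨ (i0 = b.1 ∧ rank < b.2) then some (i0, rank) else some b))
        by_cases hcond : i0 < b.1 ∨ (i0 = b.1 ∧ rank < b.2)
        · have hlt' : i0 < b.1 := by
            rcases hcond with h | h
            · exact h
            · omega
          rw [if_pos hcond]
          apply ih (rank + 1) (some (i0, rank)) (by omega) hrest
          refine ⟨by omega, hc0, ?_⟩
          intro i r hr hcand
          rcases Nat.lt_or_ge r rank with h | h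
          · have := hbmin i r h hcand
            unfold pvLex at this ⊢
            omega
          · have hrr : r = rank := by omega
            subst hrr
            have := hmin0 i hcand
            unfold pvLex
            omega
        · rw [if_neg hcond]
          apply ih (rank + 1) (some b) (by omega) hrest
          refine ⟨by omega, hbc, ?_⟩
          intro i r hr hcand
          rcases Nat.lt_or_ge r rank with h | h
          · exact hbmin i r h hcand
          · have hrr : r = rank := by omega
            subst hrr
            have hle0 := hmin0 i hcand
            unfold pvLex
            omega

theorem pvB_isBest (tptp : String) :
    ∃ o, pvIsBest tptp.toList o ∧ findBalancedBinaryOperator_py_alt tptp = o.map (pvOut tptp.toList) := by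
  set cs := tptp.toList with hcs
  refine ⟨pvBFold cs (pvBDepths cs) 0 pvOps none, ?_, ?_⟩
  · exact pvBFold_isBest cs pvOps 0 none (by rfl) (by rfl) (fun i r hr => absurd hr (by omega))
  · unfold findBalancedBinaryOperator_py_alt
    cases h : pvBFold cs (pvBDepths cs) 0 pvOps none with
    | none => simp [← hcs, h]
    | some p =>
      cases p with
      | mk i r => simp [← hcs, h, pvOut]

-- ===== VERDICT (by name: the statement is the Claim_ definition above) =====
theorem findBalancedBinaryOperator_py_spec : Claim_equal_findBalancedBinaryOperator_py := by
  intro tptp _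
  unfold Spec_findBalancedBinaryOperator_py
  obtain ⟨o₁, hb₁, he₁⟩ := pvA_isBest tptp
  obtain ⟨o₂, hb₂, he₂⟩ := pvB_isBest tptp
  rw [he₁, he₂, pvIsBest_unique tptp.toList o₁ o₂ hb₁ hb₂]
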